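-- pv_equiv track=rewrite | github.com/Stk11/Hacker_Rank | Impact Analytics/dgd.py | max_weight_sum
-- ===== SOURCE A (Python) =====
-- def max_weight_sum(matrix, n, m, queries):
--     dp = [[0] * m for _ in range(n)]
--
--     # Initialize the bottom-right cell
--     dp[n-1][m-1] = matrix[n-1][m-1]
--
--     # Initialize the last column
--     for i in range(n-2, -1, -1):
--         dp[i][m-1] = matrix[i][m-1] + dp[i+1][m-1]
--
--     # Initialize the last row
--     for j in range(m-2, -1, -1):
--         dp[n-1][j] = matrix[n-1][j] + dp[n-1][j+1]
--
--     # Fill the DP table in a bottom-up manner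
--     for i in range(n-2, -1, -1):
--         for j in range(m-2, -1, -1):
--             dp[i][j] = matrix[i][j] + max(dp[i+1][j], dp[i][j+1])
--
--     # Process queries
--     results = []
--     for query in queries:
--         query_type, x, y = query
--         if query_type == 1:
--             results.append(dp[x-1][y-1])
--         elif query_type == 2:
--             results.append(dp[0][0])
--
--     return results
-- ===== SOURCE B (Python) =====
-- def max_weight_sum(matrix, n, m, queries):
--     # Top-down evaluation of the path recurrence: memoized depth-first traversal
--     # from the top-left cell, driven by an explicit stack (no recursion limit),
--     # then answer the queries from the materialized table.
--     memo = {}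
--     stack = [(0, 0)]
--     while stack:
--         i, j = stack[-1]
--         if (i, j) in memo:
--             stack.pop()
--             continue
--         pending = []
--         if i + 1 < n and (i + 1, j) not in memo:
--             pending.append((i + 1, j))
--         if j + 1 < m and (i, j + 1) not in memo:
--             pending.append((i, j + 1))
--         if pending:
--             stack += pending
--             continue
--         best = matrix[i][j]
--         if i + 1 < n and j + 1 < m:
--             best += max(memo[(i + 1, j)], memo[(i, j + 1)])
--         elif i + 1 < n:
--             best += memo[(i + 1, j)]
--         elif j + 1 < m:
--             best += memo[(i, j + 1)]
--         memo[(i, j)] = best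
--         stack.pop()
--     dp = [[memo[(i, j)] for j in range(m)] for i in range(n)]
--     out = []
--     for t, x, y in queries:
--         if t == 1:
--             out.append(dp[x - 1][y - 1])
--         elif t == 2:
--             out.append(dp[0][0])
--     return out
-- ===== Notes on version B (the rewrite author's own statement) =====
-- stated objective: alternative
-- what changed: Replaces the bottom-up four-phase table fill with a top-down memoized depth-first evaluation of the same recurrence, driven by an explicit stack from the top-left cell; the table is then materialized from the memo and queries answered from it.
import Mathlib
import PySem

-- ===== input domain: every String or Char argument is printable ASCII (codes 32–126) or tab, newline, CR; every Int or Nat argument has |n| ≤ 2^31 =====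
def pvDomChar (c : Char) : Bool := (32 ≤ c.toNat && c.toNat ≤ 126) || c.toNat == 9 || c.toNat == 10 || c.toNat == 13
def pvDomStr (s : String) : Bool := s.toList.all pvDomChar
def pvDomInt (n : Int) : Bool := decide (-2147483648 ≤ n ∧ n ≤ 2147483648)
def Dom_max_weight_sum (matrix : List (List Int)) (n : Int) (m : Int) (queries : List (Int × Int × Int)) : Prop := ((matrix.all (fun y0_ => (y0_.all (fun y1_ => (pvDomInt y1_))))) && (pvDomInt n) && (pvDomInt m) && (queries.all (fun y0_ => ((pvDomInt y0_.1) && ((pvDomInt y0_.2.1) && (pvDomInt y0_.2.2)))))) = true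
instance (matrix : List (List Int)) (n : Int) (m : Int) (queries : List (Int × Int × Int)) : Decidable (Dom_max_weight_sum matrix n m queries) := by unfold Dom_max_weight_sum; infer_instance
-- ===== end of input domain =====

-- B replaces A's bottom-up four-phase table fill by a top-down memoized depth-first
-- evaluation of the recurrence, driven by an explicit stack from the top-left cell;
-- same results, no speed claim.


-- ===== PORT A =====
-- dp[i][j] read / dp[i][j] = v write (Python semantics, total via default; Pre_ keeps indices in range)
def pvGet2 (dp : List (List Int)) (i j : Int) : Int :=
  PySem.List.pyGetD (PySem.List.pyGetD dp i []) j 0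
def pvSet2 (dp : List (List Int)) (i j : Int) (v : Int) : List (List Int) :=
  PySem.List.pySetD dp i (PySem.List.pySetD (PySem.List.pyGetD dp i []) j v)

def max_weight_sum (matrix : List (List Int)) (n : Int) (m : Int) (queries : List (Int × Int × Int)) : List Int :=
  -- dp = [[0] * m for _ in range(n)]
  let dp := (List.range n.toNat).map (fun _ => List.replicate m.toNat (0 : Int))
  -- dp[n-1][m-1] = matrix[n-1][m-1]
  let dp := pvSet2 dp (n-1) (m-1) (pvGet2 matrix (n-1) (m-1))
  -- last column
  let dp := (PySem.List.pyRange (n-2) (-1) (-1)).foldl (fun dp i =>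
      pvSet2 dp i (m-1) (pvGet2 matrix i (m-1) + pvGet2 dp (i+1) (m-1))) dp
  -- last row
  let dp := (PySem.List.pyRange (m-2) (-1) (-1)).foldl (fun dp j =>
      pvSet2 dp (n-1) j (pvGet2 matrix (n-1) j + pvGet2 dp (n-1) (j+1))) dp
  -- interior, bottom-up
  let dp := (PySem.List.pyRange (n-2) (-1) (-1)).foldl (fun dp i =>
      (PySem.List.pyRange (m-2) (-1) (-1)).foldl (fun dp j =>
        pvSet2 dp i j (pvGet2 matrix i j + max (pvGet2 dp (i+1) j) (pvGet2 dp i (j+1)))) dp) dp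
  -- queries
  queries.foldl (fun results q =>
      if q.1 = 1 then results ++ [pvGet2 dp (q.2.1 - 1) (q.2.2 - 1)]
      else if q.1 = 2 then results ++ [pvGet2 dp 0 0]
      else results) []

-- ===== PORT B =====
-- the unmemoized in-bounds neighbours pushed for cell (i, j)  ('pending' in Source B)
def pvPending (n m : Int) (memo : PySem.Dict (Nat × Nat) Int) (i j : Nat) : List (Nat × Nat) :=
  (if (i : Int) + 1 < n ∧ memo.get? (i+1, j) = none then [(i+1, j)] else []) ++
  (if (j : Int) + 1 < m ∧ memo.get? (i, j+1) = none then [(i, j+1)] else [])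

-- 'best' in Source B: the cell weight plus the max of the memoized neighbours
def pvVal (matrix : List (List Int)) (n m : Int) (memo : PySem.Dict (Nat × Nat) Int) (i j : Nat) : Int :=
  pvGet2 matrix (i : Int) (j : Int) +
    (if (i : Int) + 1 < n ∧ (j : Int) + 1 < m then max (memo.getD (i+1, j) 0) (memo.getD (i, j+1) 0)
     else if (i : Int) + 1 < n then memo.getD (i+1, j) 0
     else if (j : Int) + 1 < m then memo.getD (i, j+1) 0
     else 0)

-- the 'while stack:' loop of Source B, one fuel unit per iteration (fuel only makes the
-- loop total in Lean; it is proved sufficient under Pre_); the stack top is the head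
def pvRun (matrix : List (List Int)) (n m : Int) :
    Nat → PySem.Dict (Nat × Nat) Int → List (Nat × Nat) → PySem.Dict (Nat × Nat) Int
  | 0, memo, _ => memo
  | _ + 1, memo, [] => memo
  | fuel + 1, memo, (i, j) :: rest =>
    if (memo.get? (i, j)).isSome then pvRun matrix n m fuel memo rest
    else if pvPending n m memo i j ≠ [] then
      pvRun matrix n m fuel memo ((pvPending n m memo i j).reverse ++ (i, j) :: rest)
    else pvRun matrix n m fuel (memo.insert (i, j) (pvVal matrix n m memo i j)) rest

def max_weight_sum_alt (matrix : List (List Int)) (n : Int) (m : Int) (queries : List (Int × Int × Int)) : List Int :=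
  let memo := pvRun matrix n m (3 * (n.toNat * m.toNat) + 1) PySem.Dict.empty [(0, 0)]
  -- dp = [[memo[(i, j)] for j in range(m)] for i in range(n)]
  let dp := (List.range n.toNat).map (fun i => (List.range m.toNat).map (fun j => memo.getD (i, j) 0))
  queries.foldl (fun out q =>
      if q.1 = 1 then out ++ [pvGet2 dp (q.2.1 - 1) (q.2.2 - 1)]
      else if q.1 = 2 then out ++ [pvGet2 dp 0 0]
      else out) []

-- ===== PRECONDITION & SPEC =====
-- Pre_ excludes exactly the inputs where Python A raises IndexError: it needs n ≥ 1, m ≥ 1,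
-- at least n rows, the first n rows at least m wide, and every type-1 query index in
-- Python's (wrap-allowing) range for the n×m table.
def Pre_max_weight_sum (matrix : List (List Int)) (n : Int) (m : Int) (queries : List (Int × Int × Int)) : Prop :=
  1 ≤ n ∧ 1 ≤ m ∧ n ≤ (matrix.length : Int) ∧
  (∀ r ∈ matrix.take n.toNat, m ≤ (r.length : Int)) ∧
  (∀ q ∈ queries, q.1 = 1 → PySem.Raise.InRange n.toNat (q.2.1 - 1) ∧ PySem.Raise.InRange m.toNat (q.2.2 - 1))
instance (matrix : List (List Int)) (n : Int) (m : Int) (queries : List (Int × Int × Int)) : Decidable (Pre_max_weight_sum matrix n m queries) := by unfold Pre_max_weight_sum; infer_instance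

def pvWitness_max_weight_sum : List (List Int) × Int × Int × (List (Int × Int × Int)) :=
  ([[1, 2], [3, 4]], 2, 2, [(1, 1, 2), (2, 0, 0), (1, -1, -1)])

def Spec_max_weight_sum (matrix : List (List Int)) (n : Int) (m : Int) (queries : List (Int × Int × Int)) (out : List Int) : Prop := out = max_weight_sum_alt matrix n m queries
instance (matrix : List (List Int)) (n : Int) (m : Int) (queries : List (Int × Int × Int)) (out : List Int) : Decidable (Spec_max_weight_sum matrix n m queries out) := by unfold Spec_max_weight_sum; infer_instance

-- ===== CLAIM (what is proved, stated in full; the proofs are below) =====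
def Claim_equal_max_weight_sum : Prop := ∀ (matrix : List (List Int)) (n : Int) (m : Int) (queries : List (Int × Int × Int)), Dom_max_weight_sum matrix n m queries → Pre_max_weight_sum matrix n m queries → Spec_max_weight_sum matrix n m queries (max_weight_sum matrix n m queries)

-- ===== LEMMAS AND PROOFS =====

-- the functional DP table both sides are proved to compute: one row from the row below
def pvMkRowNone : List Int → List Int
  | [] => []
  | x :: rest =>
    match pvMkRowNone rest with
    | [] => [x]
    | y :: ys => (x + y) :: y :: ys

def pvMkRowSome : List Int → List Int → List Int
  | x :: rest, z :: brest =>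
    (match pvMkRowSome rest brest with
    | [] => [x + z]
    | y :: ys => (x + max z y) :: y :: ys)
  | _, _ => []

def pvMkRow (r : List Int) : Option (List Int) → List Int
  | none => pvMkRowNone r
  | some b => pvMkRowSome r b

def pvMkRows : List (List Int) → List (List Int)
  | [] => []
  | r :: rest => pvMkRow r (pvMkRows rest).head? :: pvMkRows rest

theorem length_pvMkRowNone (s : List Int) : (pvMkRowNone s).length = s.length := by
  induction s with
  | nil => rfl
  | cons x rest ih =>
    simp only [pvMkRowNone]
    split <;> simp_all

theorem length_pvMkRowSome (r b : List Int) (h : r.length = b.length) :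
    (pvMkRowSome r b).length = r.length := by
  induction r generalizing b with
  | nil => cases b <;> simp_all [pvMkRowSome]
  | cons x rest ih =>
    cases b with
    | nil => simp at h
    | cons z brest =>
      simp only [pvMkRowSome]
      have := ih brest (by simpa using h)
      split <;> simp_all

theorem length_pvMkRow (r : List Int) (b? : Option (List Int))
    (h : ∀ b ∈ b?, b.length = r.length) : (pvMkRow r b?).length = r.length := by
  cases b? with
  | none => exact length_pvMkRowNone r
  | some b => exact length_pvMkRowSome r b (h b rfl).symm

theorem pvMkRowNone_cons_ex (x : Int) (rest : List Int) :
    ∃ h, pvMkRowNone (x :: rest) = h :: pvMkRowNone rest := by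
  rcases hE : pvMkRowNone rest with _ | ⟨y, ys⟩
  · exact ⟨x, by simp [pvMkRowNone, hE]⟩
  · exact ⟨x + y, by simp [pvMkRowNone, hE]⟩

theorem pvMkRowSome_cons_ex (x z : Int) (rest brest : List Int) :
    ∃ h, pvMkRowSome (x :: rest) (z :: brest) = h :: pvMkRowSome rest brest := by
  rcases hE : pvMkRowSome rest brest with _ | ⟨y, ys⟩
  · exact ⟨x + z, by simp [pvMkRowSome, hE]⟩
  · exact ⟨x + max z y, by simp [pvMkRowSome, hE]⟩

theorem drop_pvMkRowNone (k : Nat) (s : List Int) :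
    (pvMkRowNone s).drop k = pvMkRowNone (s.drop k) := by
  induction k generalizing s with
  | zero => simp
  | succ k ih =>
    cases s with
    | nil => simp [pvMkRowNone]
    | cons x rest =>
      obtain ⟨h, hh⟩ := pvMkRowNone_cons_ex x rest
      rw [hh, List.drop_succ_cons, ih, List.drop_succ_cons]

theorem drop_pvMkRowSome (k : Nat) (r b : List Int) (h : r.length = b.length) :
    (pvMkRowSome r b).drop k = pvMkRowSome (r.drop k) (b.drop k) := by
  induction k generalizing r b with
  | zero => simp
  | succ k ih =>
    cases r with
    | nil => cases b <;> simp [pvMkRowSome]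
    | cons x rest =>
      cases b with
      | nil => simp at h
      | cons z brest =>
        obtain ⟨hd, hh⟩ := pvMkRowSome_cons_ex x z rest brest
        rw [hh, List.drop_succ_cons, ih rest brest (by simpa using h),
          List.drop_succ_cons, List.drop_succ_cons]

theorem length_pvMkRows (L : List (List Int)) : (pvMkRows L).length = L.length := by
  induction L with
  | nil => rfl
  | cons r rest ih => simp [pvMkRows, ih]

theorem drop_pvMkRows (k : Nat) (L : List (List Int)) :
    (pvMkRows L).drop k = pvMkRows (L.drop k) := by
  induction k generalizing L with
  | zero => simp
  | succ k ih =>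
    cases L with
    | nil => simp [pvMkRows]
    | cons r rest => rw [pvMkRows, List.drop_succ_cons, ih, List.drop_succ_cons]

theorem row_len_pvMkRows (L : List (List Int)) (m' : Nat)
    (h : ∀ r ∈ L, r.length = m') : ∀ row ∈ pvMkRows L, row.length = m' := by
  induction L with
  | nil => simp [pvMkRows]
  | cons r rest ih =>
    intro row hrow
    rw [pvMkRows] at hrow
    rcases List.mem_cons.mp hrow with h1 | h1
    · subst h1
      have hlen : ∀ b ∈ (pvMkRows rest).head?, b.length = r.length := by
        intro b hb
        have hmem : b ∈ pvMkRows rest := List.mem_of_mem_head? hb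
        rw [ih (fun r hr => h r (List.mem_cons_of_mem _ hr)) b hmem,
          h r List.mem_cons_self]
      rw [length_pvMkRow r _ hlen]
      exact h r List.mem_cons_self
    · exact ih (fun r hr => h r (List.mem_cons_of_mem _ hr)) row h1

-- peeling one row off the table
theorem pvMkRows_drop_cons (L : List (List Int)) (i : Nat) (hi : i < L.length) :
    (pvMkRows L).drop i
      = pvMkRow (L.getD i []) ((pvMkRows L).drop (i+1)).head? :: (pvMkRows L).drop (i+1) := by
  rw [drop_pvMkRows, drop_pvMkRows, List.drop_eq_getElem_cons hi, pvMkRows,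
    List.getD_eq_getElem?_getD, List.getElem?_eq_getElem hi]
  rfl

theorem pvGetD_map_range (f : Nat → List Int) (n x : Nat) (hx : x < n) :
    (((List.range n).map f).getD x []) = f x := by
  rw [List.getD_eq_getElem?_getD, List.getElem?_map, List.getElem?_range hx]
  rfl

theorem pvLastSingleton (l : List Int) (m' : Nat) (h : l.length = m') (h0 : 0 < m') :
    l.drop (m'-1) = [l.getD (m'-1) 0] := by
  have h1 : m' - 1 < l.length := by omega
  rw [List.drop_eq_getElem_cons h1, List.drop_eq_nil_of_le (by omega),
    List.getD_eq_getElem?_getD, List.getElem?_eq_getElem h1]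
  rfl

theorem pvReplicateSet (m' : Nat) (h : 0 < m') (v : Int) :
    (List.replicate m' (0:Int)).set (m'-1) v = List.replicate (m'-1) 0 ++ [v] := by
  conv_lhs => rw [show m' = (m'-1)+1 by omega, List.replicate_succ']
  simp

theorem pvConsSet (k : Nat) (y v : Int) (t : List Int) :
    (List.replicate k (0:Int) ++ y :: t).set k v = List.replicate k 0 ++ v :: t := by
  simp

-- row-locality of A's last-row phase
theorem pvTable3X (matrix : List (List Int)) (n' : Nat) :
    ∀ (js : List Int) (dp : List (List Int)), n' - 1 < dp.length →
      js.foldl (fun dp j =>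
          pvSet2 dp ((n'-1 : Nat) : Int) j
            (pvGet2 matrix ((n'-1 : Nat) : Int) j + pvGet2 dp ((n'-1 : Nat) : Int) (j+1))) dp
        = dp.set (n'-1) (js.foldl (fun row j =>
            PySem.List.pySetD row j
              (PySem.List.pyGetD (PySem.List.pyGetD matrix ((n'-1 : Nat) : Int) []) j 0
                + PySem.List.pyGetD row (j+1) 0)) (dp.getD (n'-1) [])) := by
  intro js
  induction js with
  | nil =>
    intro dp hlen
    rw [List.foldl_nil, List.foldl_nil, List.getD_eq_getElem?_getD,
      List.getElem?_eq_getElem hlen]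
    exact (List.set_getElem_self hlen).symm
  | cons j js ih =>
    intro dp hlen
    rw [List.foldl_cons, List.foldl_cons]
    have hstep : pvSet2 dp ((n'-1 : Nat) : Int) j
        (pvGet2 matrix ((n'-1 : Nat) : Int) j + pvGet2 dp ((n'-1 : Nat) : Int) (j+1))
        = dp.set (n'-1) (PySem.List.pySetD (dp.getD (n'-1) [])  j
            (PySem.List.pyGetD (PySem.List.pyGetD matrix ((n'-1 : Nat) : Int) []) j 0
              + PySem.List.pyGetD (dp.getD (n'-1) []) (j+1) 0)) := by
      unfold pvSet2 pvGet2
      rw [PySem.List.pySetD_natCast, PySem.List.pyGetD_natCast, PySem.List.pyGetD_natCast]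
    rw [hstep, ih _ (by simpa using hlen)]
    rw [List.set_set]
    congr 1
    rw [List.getD_eq_getElem?_getD, List.getElem?_set_self hlen]
    rfl

-- row-locality of A's interior phase (row i'+1 is read but not written)
theorem pvTable4X (matrix : List (List Int)) (i' : Nat) :
    ∀ (js : List Int) (dp : List (List Int)), i' + 1 < dp.length →
      js.foldl (fun dp j =>
          pvSet2 dp (i' : Int) j
            (pvGet2 matrix (i' : Int) j +
              max (pvGet2 dp ((i' : Int)+1) j) (pvGet2 dp (i' : Int) (j+1)))) dp
        = dp.set i' (js.foldl (fun row j =>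
            PySem.List.pySetD row j
              (PySem.List.pyGetD (PySem.List.pyGetD matrix (i' : Int) []) j 0 +
                max (PySem.List.pyGetD (dp.getD (i'+1) []) j 0)
                    (PySem.List.pyGetD row (j+1) 0))) (dp.getD i' [])) := by
  intro js
  induction js with
  | nil =>
    intro dp hlen
    rw [List.foldl_nil, List.foldl_nil, List.getD_eq_getElem?_getD,
      List.getElem?_eq_getElem (by omega : i' < dp.length)]
    exact (List.set_getElem_self (by omega)).symm
  | cons j js ih =>
    intro dp hlen
    rw [List.foldl_cons, List.foldl_cons]
    have hcast : ((i' : Int) + 1) = ((i' + 1 : Nat) : Int) := by push_cast; ring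
    have hstep : pvSet2 dp (i' : Int) j
        (pvGet2 matrix (i' : Int) j +
          max (pvGet2 dp ((i' : Int)+1) j) (pvGet2 dp (i' : Int) (j+1)))
        = dp.set i' (PySem.List.pySetD (dp.getD i' []) j
            (PySem.List.pyGetD (PySem.List.pyGetD matrix (i' : Int) []) j 0 +
              max (PySem.List.pyGetD (dp.getD (i'+1) []) j 0)
                  (PySem.List.pyGetD (dp.getD i' []) (j+1) 0))) := by
      unfold pvSet2 pvGet2
      rw [hcast, PySem.List.pySetD_natCast, PySem.List.pyGetD_natCast,
        PySem.List.pyGetD_natCast, PySem.List.pyGetD_natCast]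
    rw [hstep, ih _ (by simpa using hlen)]
    rw [List.set_set]
    have hrow : (dp.set i' (PySem.List.pySetD (dp.getD i' []) j
        (PySem.List.pyGetD (PySem.List.pyGetD matrix (i' : Int) []) j 0 +
          max (PySem.List.pyGetD (dp.getD (i'+1) []) j 0)
              (PySem.List.pyGetD (dp.getD i' []) (j+1) 0)))).getD i' []
        = PySem.List.pySetD (dp.getD i' []) j
            (PySem.List.pyGetD (PySem.List.pyGetD matrix (i' : Int) []) j 0 +
              max (PySem.List.pyGetD (dp.getD (i'+1) []) j 0)
                  (PySem.List.pyGetD (dp.getD i' []) (j+1) 0)) := by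
      rw [List.getD_eq_getElem?_getD, List.getElem?_set_self (by omega)]
      rfl
    have hprev : (dp.set i' (PySem.List.pySetD (dp.getD i' []) j
        (PySem.List.pyGetD (PySem.List.pyGetD matrix (i' : Int) []) j 0 +
          max (PySem.List.pyGetD (dp.getD (i'+1) []) j 0)
              (PySem.List.pyGetD (dp.getD i' []) (j+1) 0)))).getD (i'+1) []
        = dp.getD (i'+1) [] := by
      rw [List.getD_eq_getElem?_getD, List.getElem?_set_ne (by omega),
        ← List.getD_eq_getElem?_getD]
    rw [hrow, hprev]

theorem pvInnA_noneX (r : List Int) (m' : Nat) (hm0 : 0 < m') (hr : m' ≤ r.length) :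
    ∀ (k : Nat), k ≤ m' - 1 → ∀ row : List Int,
      row = List.replicate k 0 ++ (pvMkRowNone (r.take m')).drop k →
      (PySem.List.pyRange ((k : Int) - 1) (-1) (-1)).foldl
        (fun row j => PySem.List.pySetD row j
          (PySem.List.pyGetD r j 0 + PySem.List.pyGetD row (j+1) 0)) row
      = pvMkRowNone (r.take m') := by
  have hrt : (r.take m').length = m' := by simp [List.length_take]; omega
  have hNlen : (pvMkRowNone (r.take m')).length = m' := by rw [length_pvMkRowNone, hrt]
  intro k
  induction k with
  | zero =>
    intro _ row hrow
    rw [show ((0:Nat):Int) - 1 = (-1 : Int) by ring, PySem.List.pyRange_neg_one_eq_nil (by omega)]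
    simpa using hrow
  | succ k ih =>
    intro hk row hrow
    have hkm : k < m' := by omega
    have hrk : k < r.length := by omega
    rw [show (((k+1:Nat)):Int) - 1 = ((k:Nat):Int) by push_cast; ring,
      PySem.List.pyRange_neg_one_cons (by omega), List.foldl_cons]
    have hgetr : PySem.List.pyGetD r ((k:Nat):Int) 0 = (r.take m')[k]'(by omega) := by
      rw [PySem.List.pyGetD_natCast, List.getD_eq_getElem?_getD, List.getElem?_eq_getElem hrk]
      simp [List.getElem_take]
    have hcons : (r.take m').drop k = (r.take m')[k]'(by omega) :: (r.take m').drop (k+1) :=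
      List.drop_eq_getElem_cons (by omega)
    obtain ⟨y, ys, hE⟩ : ∃ y ys, (pvMkRowNone (r.take m')).drop (k+1) = y :: ys := by
      rcases hE2 : (pvMkRowNone (r.take m')).drop (k+1) with _ | ⟨y, ys⟩
      · exfalso; have := congrArg List.length hE2; simp [hNlen] at this; omega
      · exact ⟨y, ys, rfl⟩
    have hdk : (pvMkRowNone (r.take m')).drop k
        = (PySem.List.pyGetD r ((k:Nat):Int) 0 + y) :: y :: ys := by
      rw [hgetr, drop_pvMkRowNone, hcons]
      simp [pvMkRowNone, ← drop_pvMkRowNone, hE]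
    have hget1 : PySem.List.pyGetD row (((k:Nat):Int)+1) 0 = y := by
      rw [show (((k:Nat):Int)+1) = ((k+1:Nat):Int) by push_cast; ring,
        PySem.List.pyGetD_natCast, hrow, hE, List.getD_eq_getElem?_getD,
        List.getElem?_append_right (by simp), List.length_replicate]
      simp
    have hset : PySem.List.pySetD row ((k:Nat):Int)
        (PySem.List.pyGetD r ((k:Nat):Int) 0 + PySem.List.pyGetD row (((k:Nat):Int)+1) 0)
        = List.replicate k 0 ++ (pvMkRowNone (r.take m')).drop k := by
      rw [hget1, PySem.List.pySetD_natCast, hrow, hE, hdk,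
        show List.replicate (k+1) (0:Int) = List.replicate k 0 ++ [0] from List.replicate_succ',
        List.append_assoc, List.cons_append, List.nil_append]
      exact pvConsSet k 0 _ (y :: ys)
    rw [hset]
    exact ih (by omega) _ rfl

theorem pvInnA_someX (r b : List Int) (m' : Nat) (hm0 : 0 < m') (hr : m' ≤ r.length)
    (hb : b.length = m') :
    ∀ (k : Nat), k ≤ m' - 1 → ∀ row : List Int,
      row = List.replicate k 0 ++ (pvMkRowSome (r.take m') b).drop k →
      (PySem.List.pyRange ((k : Int) - 1) (-1) (-1)).foldl
        (fun row j => PySem.List.pySetD row j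
          (PySem.List.pyGetD r j 0 +
            max (PySem.List.pyGetD b j 0) (PySem.List.pyGetD row (j+1) 0))) row
      = pvMkRowSome (r.take m') b := by
  have hrt : (r.take m').length = m' := by simp [List.length_take]; omega
  have hlen2 : (r.take m').length = b.length := by rw [hrt, hb]
  have hNlen : (pvMkRowSome (r.take m') b).length = m' := by
    rw [length_pvMkRowSome _ _ hlen2, hrt]
  intro k
  induction k with
  | zero =>
    intro _ row hrow
    rw [show ((0:Nat):Int) - 1 = (-1 : Int) by ring, PySem.List.pyRange_neg_one_eq_nil (by omega)]
    simpa using hrow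
  | succ k ih =>
    intro hk row hrow
    have hkm : k < m' := by omega
    have hrk : k < r.length := by omega
    rw [show (((k+1:Nat)):Int) - 1 = ((k:Nat):Int) by push_cast; ring,
      PySem.List.pyRange_neg_one_cons (by omega), List.foldl_cons]
    have hgetr : PySem.List.pyGetD r ((k:Nat):Int) 0 = (r.take m')[k]'(by omega) := by
      rw [PySem.List.pyGetD_natCast, List.getD_eq_getElem?_getD, List.getElem?_eq_getElem hrk]
      simp [List.getElem_take]
    have hgetb : PySem.List.pyGetD b ((k:Nat):Int) 0 = b[k]'(by omega) := by
      rw [PySem.List.pyGetD_natCast, List.getD_eq_getElem?_getD,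
        List.getElem?_eq_getElem (by omega : k < b.length)]
      rfl
    have hcons : (r.take m').drop k = (r.take m')[k]'(by omega) :: (r.take m').drop (k+1) :=
      List.drop_eq_getElem_cons (by omega)
    have hbcons : b.drop k = b[k]'(by omega) :: b.drop (k+1) :=
      List.drop_eq_getElem_cons (by omega)
    obtain ⟨y, ys, hE⟩ : ∃ y ys, (pvMkRowSome (r.take m') b).drop (k+1) = y :: ys := by
      rcases hE2 : (pvMkRowSome (r.take m') b).drop (k+1) with _ | ⟨y, ys⟩
      · exfalso; have := congrArg List.length hE2; simp [hNlen] at this; omega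
      · exact ⟨y, ys, rfl⟩
    have hdk : (pvMkRowSome (r.take m') b).drop k
        = (PySem.List.pyGetD r ((k:Nat):Int) 0
            + max (PySem.List.pyGetD b ((k:Nat):Int) 0) y) :: y :: ys := by
      rw [hgetr, hgetb, drop_pvMkRowSome _ _ _ hlen2, hcons, hbcons]
      simp [pvMkRowSome, ← drop_pvMkRowSome _ _ _ hlen2, hE]
    have hget1 : PySem.List.pyGetD row (((k:Nat):Int)+1) 0 = y := by
      rw [show (((k:Nat):Int)+1) = ((k+1:Nat):Int) by push_cast; ring,
        PySem.List.pyGetD_natCast, hrow, hE, List.getD_eq_getElem?_getD,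
        List.getElem?_append_right (by simp), List.length_replicate]
      simp
    have hset : PySem.List.pySetD row ((k:Nat):Int)
        (PySem.List.pyGetD r ((k:Nat):Int) 0 +
          max (PySem.List.pyGetD b ((k:Nat):Int) 0) (PySem.List.pyGetD row (((k:Nat):Int)+1) 0))
        = List.replicate k 0 ++ (pvMkRowSome (r.take m') b).drop k := by
      rw [hget1, PySem.List.pySetD_natCast, hrow, hE, hdk,
        show List.replicate (k+1) (0:Int) = List.replicate k 0 ++ [0] from List.replicate_succ',
        List.append_assoc, List.cons_append, List.nil_append]
      exact pvConsSet k 0 _ (y :: ys)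
    rw [hset]
    exact ih (by omega) _ rfl

theorem pvRows_getD (M : List (List Int)) (i : Nat) (hi : i < M.length) :
    (pvMkRows M).getD i [] = pvMkRow (M.getD i []) (((pvMkRows M).drop (i+1)).head?) := by
  have h := pvMkRows_drop_cons M i hi
  rw [List.getD_eq_getElem?_getD, ← List.head?_drop, h]
  rfl

theorem pvMget (matrix : List (List Int)) (n' m' i : Nat) (hi : i < n') (hn : n' ≤ matrix.length) :
    ((matrix.take n').map (fun r => r.take m')).getD i [] = (matrix.getD i []).take m' := by
  have hkmat : i < matrix.length := by omega
  rw [List.getD_eq_getElem?_getD, List.getElem?_map, List.getElem?_take_of_lt hi,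
    List.getElem?_eq_getElem hkmat, List.getD_eq_getElem?_getD, List.getElem?_eq_getElem hkmat]
  rfl

theorem pvR_lastX (matrix : List (List Int)) (n' m' : Nat) (hm0 : 0 < m')
    (hn : n' ≤ matrix.length) (hr : ∀ r ∈ matrix.take n', m' ≤ r.length)
    (R : List (List Int)) (hR : R = pvMkRows ((matrix.take n').map (fun r => r.take m')))
    (i : Nat) (hi : i < n') :
    (R.getD i []).drop (m'-1)
      = [(matrix.getD i []).getD (m'-1) 0 +
          (if i + 1 < n' then (R.getD (i+1) []).getD (m'-1) 0 else 0)] := by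
  have hMlen : ((matrix.take n').map (fun r => r.take m')).length = n' := by
    simp [List.length_take]; omega
  have hRlen : R.length = n' := by rw [hR, length_pvMkRows, hMlen]
  have hRrows : ∀ row ∈ R, row.length = m' := by
    rw [hR]
    refine row_len_pvMkRows _ _ ?_
    intro row hrow
    obtain ⟨r, hrmem, rfl⟩ := List.mem_map.mp hrow
    simp [List.length_take]
    exact hr r hrmem
  have hmat : i < matrix.length := by omega
  have hmem : matrix.getD i [] ∈ matrix.take n' := by
    have h2 : i < (matrix.take n').length := by simp [List.length_take]; omega
    rw [List.getD_eq_getElem?_getD, List.getElem?_eq_getElem hmat]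
    rw [show matrix[i]'hmat = (matrix.take n')[i]'h2 from (List.getElem_take).symm]
    exact List.getElem_mem h2
  have hrlen : m' ≤ (matrix.getD i []).length := hr _ hmem
  have hg : ((matrix.getD i []).take m').length = m' := by rw [List.length_take]; omega
  have hgd : ((matrix.getD i []).take m').drop (m'-1)
      = [((matrix.getD i []).take m').getD (m'-1) 0] := pvLastSingleton _ _ hg hm0
  have hgetlast : ((matrix.getD i []).take m').getD (m'-1) 0
      = (matrix.getD i []).getD (m'-1) 0 := by
    simp [List.getD_eq_getElem?_getD, List.getElem?_take_of_lt (show m' - 1 < m' by omega)]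
  have hrow := pvRows_getD ((matrix.take n').map (fun r => r.take m')) i (by omega)
  rw [← hR] at hrow
  rw [pvMget matrix n' m' i hi hn] at hrow
  by_cases hlt : i + 1 < n'
  · have hhead : (R.drop (i+1)).head? = some (R.getD (i+1) []) := by
      rw [List.head?_drop, List.getD_eq_getElem?_getD,
        List.getElem?_eq_getElem (by rw [hRlen]; omega)]
      rfl
    have hblen : (R.getD (i+1) []).length = m' := by
      refine hRrows _ ?_
      rw [List.getD_eq_getElem?_getD, List.getElem?_eq_getElem (by rw [hRlen]; omega : i+1 < R.length)]
      exact List.getElem_mem _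
    have hbdrop : (R.getD (i+1) []).drop (m'-1) = [(R.getD (i+1) []).getD (m'-1) 0] :=
      pvLastSingleton _ _ hblen hm0
    rw [hrow, hhead, if_pos hlt]
    rw [show pvMkRow ((matrix.getD i []).take m') (some (R.getD (i+1) []))
        = pvMkRowSome ((matrix.getD i []).take m') (R.getD (i+1) []) from rfl]
    rw [drop_pvMkRowSome _ _ _ (by rw [hg, hblen]), hgd, hbdrop]
    simp only [pvMkRowSome]
    rw [List.getD_eq_getElem?_getD, List.getD_eq_getElem?_getD,
      List.getElem?_take_of_lt (show m' - 1 < m' by omega)]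
    simp [List.getD_eq_getElem?_getD]
  · have hhead : (R.drop (i+1)).head? = none := by
      rw [List.drop_eq_nil_of_le (by rw [hRlen]; omega)]
      rfl
    rw [hrow, hhead, if_neg hlt]
    rw [show pvMkRow ((matrix.getD i []).take m') none
        = pvMkRowNone ((matrix.getD i []).take m') from rfl]
    rw [drop_pvMkRowNone, hgd]
    simp only [pvMkRowNone]
    rw [List.getD_eq_getElem?_getD, List.getD_eq_getElem?_getD,
      List.getElem?_take_of_lt (show m' - 1 < m' by omega)]
    simp [List.getD_eq_getElem?_getD]

def pvColRow (m' : Nat) (R : List (List Int)) (i : Nat) : List Int :=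
  (List.replicate m' (0 : Int)).set (m'-1) ((R.getD i []).getD (m'-1) 0)

def pvU (n' m' : Nat) (R : List (List Int)) (k : Nat) : List (List Int) :=
  (List.range n').map (fun i => if k ≤ i then pvColRow m' R i else List.replicate m' (0 : Int))

def pvS (n' m' : Nat) (R : List (List Int)) (k : Nat) : List (List Int) :=
  (List.range n').map (fun i => if i < k then pvColRow m' R i else R.getD i [])

theorem pvUlen (n' m' : Nat) (R : List (List Int)) (k : Nat) : (pvU n' m' R k).length = n' := by
  simp [pvU]

theorem pvUget (n' m' : Nat) (R : List (List Int)) (K x : Nat) (hx : x < n') :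
    (pvU n' m' R K).getD x [] = if K ≤ x then pvColRow m' R x else List.replicate m' 0 := by
  rw [pvU, pvGetD_map_range _ _ _ hx]

theorem pvSget (n' m' : Nat) (R : List (List Int)) (K x : Nat) (hx : x < n') :
    (pvS n' m' R K).getD x [] = if x < K then pvColRow m' R x else R.getD x [] := by
  rw [pvS, pvGetD_map_range _ _ _ hx]

theorem pvColRow_getD (m' : Nat) (hm0 : 0 < m') (R : List (List Int)) (i : Nat) :
    (pvColRow m' R i).getD (m'-1) 0 = (R.getD i []).getD (m'-1) 0 := by
  rw [pvColRow, List.getD_eq_getElem?_getD,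
    List.getElem?_set_self (by simp [List.length_replicate]; omega)]
  rfl

theorem pvPhase2_loopX (matrix : List (List Int)) (n' m' : Nat)
    (hm0 : 0 < m') (hn0 : 0 < n') (hn : n' ≤ matrix.length)
    (hr : ∀ r ∈ matrix.take n', m' ≤ r.length)
    (R : List (List Int)) (hR : R = pvMkRows ((matrix.take n').map (fun r => r.take m'))) :
    ∀ (k : Nat), k ≤ n' - 1 →
      (PySem.List.pyRange ((k : Int) - 1) (-1) (-1)).foldl
        (fun dp i => pvSet2 dp i ((m'-1 : Nat) : Int)
          (pvGet2 matrix i ((m'-1 : Nat) : Int) + pvGet2 dp (i+1) ((m'-1 : Nat) : Int)))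
        (pvU n' m' R k)
      = pvU n' m' R 0 := by
  intro k
  induction k with
  | zero =>
    intro _
    rw [show ((0:Nat):Int) - 1 = (-1 : Int) by ring,
      PySem.List.pyRange_neg_one_eq_nil (by omega), List.foldl_nil]
  | succ k ih =>
    intro hk
    have hkn : k + 1 < n' := by omega
    rw [show (((k+1:Nat)):Int) - 1 = ((k:Nat):Int) by push_cast; ring,
      PySem.List.pyRange_neg_one_cons (by omega), List.foldl_cons]
    have hstep : pvSet2 (pvU n' m' R (k+1)) ((k:Nat):Int) ((m'-1 : Nat) : Int)
        (pvGet2 matrix ((k:Nat):Int) ((m'-1 : Nat) : Int)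
          + pvGet2 (pvU n' m' R (k+1)) (((k:Nat):Int)+1) ((m'-1 : Nat) : Int))
        = pvU n' m' R k := by
      unfold pvSet2 pvGet2
      rw [show (((k:Nat):Int)+1) = ((k+1:Nat):Int) by push_cast; ring]
      rw [PySem.List.pySetD_natCast, PySem.List.pyGetD_natCast, PySem.List.pyGetD_natCast,
        PySem.List.pyGetD_natCast, PySem.List.pySetD_natCast, PySem.List.pyGetD_natCast,
        PySem.List.pyGetD_natCast]
      rw [pvUget n' m' R (k+1) (k+1) hkn, if_pos (le_refl (k+1)),
        pvUget n' m' R (k+1) k (by omega), if_neg (by omega)]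
      rw [pvColRow_getD m' hm0 R (k+1)]
      have hlast := pvR_lastX matrix n' m' hm0 hn hr R hR k (by omega)
      rw [if_pos hkn] at hlast
      have hv : (R.getD k []).getD (m'-1) 0
          = (matrix.getD k []).getD (m'-1) 0 + (R.getD (k+1) []).getD (m'-1) 0 := by
        have h1 := congrArg List.head? hlast
        rw [List.head?_drop] at h1
        rw [List.getD_eq_getElem?_getD, h1]
        rfl
      rw [← hv]
      apply List.ext_getElem (by simp [pvU])
      intro idx h1 h2
      simp only [pvU, List.getElem_map, List.getElem_range, List.getElem_set,
        List.length_map, List.length_range] at h1 h2 ⊢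
      by_cases hik : k = idx
      · subst hik
        rw [if_pos rfl, if_pos (le_refl k)]
        rfl
      · rw [if_neg hik, if_congr (by omega : (k+1 ≤ idx) ↔ (k ≤ idx)) rfl rfl]
    rw [hstep]
    exact ih (by omega)

theorem pvPhase4_loopX (matrix : List (List Int)) (n' m' : Nat)
    (hm0 : 0 < m') (hn0 : 0 < n') (hn : n' ≤ matrix.length)
    (hr : ∀ r ∈ matrix.take n', m' ≤ r.length)
    (R : List (List Int)) (hR : R = pvMkRows ((matrix.take n').map (fun r => r.take m'))) :
    ∀ (k : Nat), k ≤ n' - 1 →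
      (PySem.List.pyRange ((k : Int) - 1) (-1) (-1)).foldl
        (fun dp i =>
          (PySem.List.pyRange (((m'-1 : Nat) : Int) - 1) (-1) (-1)).foldl (fun dp j =>
            pvSet2 dp i j (pvGet2 matrix i j
              + max (pvGet2 dp (i+1) j) (pvGet2 dp i (j+1)))) dp)
        (pvS n' m' R k)
      = pvS n' m' R 0 := by
  have hMlen : ((matrix.take n').map (fun r => r.take m')).length = n' := by
    simp [List.length_take]; omega
  have hRlen : R.length = n' := by rw [hR, length_pvMkRows, hMlen]
  have hRrows : ∀ row ∈ R, row.length = m' := by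
    rw [hR]
    refine row_len_pvMkRows _ _ ?_
    intro row hrow
    obtain ⟨r, hrmem, rfl⟩ := List.mem_map.mp hrow
    simp [List.length_take]
    exact hr r hrmem
  intro k
  induction k with
  | zero =>
    intro _
    rw [show ((0:Nat):Int) - 1 = (-1 : Int) by ring,
      show PySem.List.pyRange ((-1) : Int) (-1) (-1) = []
        from PySem.List.pyRange_neg_one_eq_nil (by omega), List.foldl_nil]
  | succ k ih =>
    intro hk
    have hkn : k + 1 < n' := by omega
    have hkmat : k < matrix.length := by omega
    rw [show (((k+1:Nat)):Int) - 1 = ((k:Nat):Int) by push_cast; ring,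
      show PySem.List.pyRange ((k:Nat):Int) (-1) (-1)
          = ((k:Nat):Int) :: PySem.List.pyRange (((k:Nat):Int)-1) (-1) (-1)
        from PySem.List.pyRange_neg_one_cons (by omega), List.foldl_cons]
    have hSlen : (pvS n' m' R (k+1)).length = n' := by simp [pvS]
    have htbl := pvTable4X matrix k (PySem.List.pyRange (((m'-1 : Nat) : Int) - 1) (-1) (-1))
      (pvS n' m' R (k+1)) (by omega)
    rw [htbl]
    have hprev : (pvS n' m' R (k+1)).getD (k+1) [] = R.getD (k+1) [] := by
      rw [pvSget n' m' R (k+1) (k+1) hkn, if_neg (by omega)]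
    have hcur : (pvS n' m' R (k+1)).getD k [] = pvColRow m' R k := by
      rw [pvSget n' m' R (k+1) k (by omega), if_pos (by omega)]
    rw [hprev, hcur]
    have hrmat : m' ≤ (PySem.List.pyGetD matrix ((k:Nat):Int) []).length := by
      rw [PySem.List.pyGetD_natCast]
      refine hr _ ?_
      have h2 : k < (matrix.take n').length := by simp [List.length_take]; omega
      rw [List.getD_eq_getElem?_getD, List.getElem?_eq_getElem hkmat]
      rw [show matrix[k]'hkmat = (matrix.take n')[k]'h2 from (List.getElem_take).symm]
      exact List.getElem_mem h2
    have hblen : (R.getD (k+1) []).length = m' := by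
      refine hRrows _ ?_
      rw [List.getD_eq_getElem?_getD, List.getElem?_eq_getElem (by rw [hRlen]; omega : k+1 < R.length)]
      exact List.getElem_mem _
    have hRk : pvMkRowSome ((PySem.List.pyGetD matrix ((k:Nat):Int) []).take m') (R.getD (k+1) [])
        = R.getD k [] := by
      have hrowk := pvRows_getD ((matrix.take n').map (fun r => r.take m')) k (by omega)
      rw [← hR, pvMget matrix n' m' k (by omega) hn] at hrowk
      have hhead : (R.drop (k+1)).head? = some (R.getD (k+1) []) := by
        rw [List.head?_drop, List.getD_eq_getElem?_getD,
          List.getElem?_eq_getElem (by rw [hRlen]; omega)]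
        rfl
      rw [hrowk, hhead, PySem.List.pyGetD_natCast]
      rfl
    have hlast := pvR_lastX matrix n' m' hm0 hn hr R hR k (by omega)
    rw [if_pos hkn] at hlast
    have hinit : pvColRow m' R k
        = List.replicate (m'-1) 0
          ++ (pvMkRowSome ((PySem.List.pyGetD matrix ((k:Nat):Int) []).take m')
              (R.getD (k+1) [])).drop (m'-1) := by
      rw [hRk, pvColRow, pvReplicateSet m' hm0]
      congr 1
      have hklen : (R.getD k []).length = m' := by
        refine hRrows _ ?_
        rw [List.getD_eq_getElem?_getD, List.getElem?_eq_getElem (by rw [hRlen]; omega : k < R.length)]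
        exact List.getElem_mem _
      rw [pvLastSingleton _ _ hklen hm0]
    have hfill := pvInnA_someX (PySem.List.pyGetD matrix ((k:Nat):Int) []) (R.getD (k+1) [])
      m' hm0 hrmat hblen (m'-1) (le_refl _) (pvColRow m' R k) hinit
    rw [hfill, hRk]
    have hset : (pvS n' m' R (k+1)).set k (R.getD k []) = pvS n' m' R k := by
      apply List.ext_getElem (by simp [pvS])
      intro idx h1 h2
      simp only [pvS, List.getElem_map, List.getElem_range, List.getElem_set,
        List.length_map, List.length_range] at h1 h2 ⊢
      by_cases hik : k = idx
      · subst hik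
        rw [if_pos rfl, if_neg (by omega)]
      · rw [if_neg hik, if_congr (by omega : (idx < k+1) ↔ (idx < k)) rfl rfl]
    rw [hset]
    exact ih (by omega)

theorem pvA_unfold (matrix : List (List Int)) (n m : Int) (queries : List (Int × Int × Int)) :
    max_weight_sum matrix n m queries
      = (queries.foldl (fun results q =>
          if q.1 = 1 then results ++ [pvGet2
            ((PySem.List.pyRange (n-2) (-1) (-1)).foldl (fun dp i =>
              (PySem.List.pyRange (m-2) (-1) (-1)).foldl (fun dp j =>
                pvSet2 dp i j (pvGet2 matrix i j
                  + max (pvGet2 dp (i+1) j) (pvGet2 dp i (j+1)))) dp)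
              ((PySem.List.pyRange (m-2) (-1) (-1)).foldl (fun dp j =>
                pvSet2 dp (n-1) j (pvGet2 matrix (n-1) j + pvGet2 dp (n-1) (j+1)))
                ((PySem.List.pyRange (n-2) (-1) (-1)).foldl (fun dp i =>
                  pvSet2 dp i (m-1) (pvGet2 matrix i (m-1) + pvGet2 dp (i+1) (m-1)))
                  (pvSet2 ((List.range n.toNat).map (fun _ => List.replicate m.toNat (0:Int)))
                    (n-1) (m-1) (pvGet2 matrix (n-1) (m-1))))))
            (q.2.1 - 1) (q.2.2 - 1)]
          else if q.1 = 2 then results ++ [pvGet2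
            ((PySem.List.pyRange (n-2) (-1) (-1)).foldl (fun dp i =>
              (PySem.List.pyRange (m-2) (-1) (-1)).foldl (fun dp j =>
                pvSet2 dp i j (pvGet2 matrix i j
                  + max (pvGet2 dp (i+1) j) (pvGet2 dp i (j+1)))) dp)
              ((PySem.List.pyRange (m-2) (-1) (-1)).foldl (fun dp j =>
                pvSet2 dp (n-1) j (pvGet2 matrix (n-1) j + pvGet2 dp (n-1) (j+1)))
                ((PySem.List.pyRange (n-2) (-1) (-1)).foldl (fun dp i =>
                  pvSet2 dp i (m-1) (pvGet2 matrix i (m-1) + pvGet2 dp (i+1) (m-1)))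
                  (pvSet2 ((List.range n.toNat).map (fun _ => List.replicate m.toNat (0:Int)))
                    (n-1) (m-1) (pvGet2 matrix (n-1) (m-1)))))) 0 0]
          else results) []) := rfl

theorem pvAsideX (matrix : List (List Int)) (queries : List (Int × Int × Int)) (n' m' : Nat)
    (hn0 : 0 < n') (hm0 : 0 < m') (hn : n' ≤ matrix.length)
    (hr : ∀ r ∈ matrix.take n', m' ≤ r.length) :
    max_weight_sum matrix (n' : Int) (m' : Int) queries
      = queries.foldl (fun results q =>
          if q.1 = 1 then
            results ++ [pvGet2 (pvMkRows ((matrix.take n').map (fun r => r.take m')))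
              (q.2.1 - 1) (q.2.2 - 1)]
          else if q.1 = 2 then
            results ++ [pvGet2 (pvMkRows ((matrix.take n').map (fun r => r.take m'))) 0 0]
          else results) [] := by
  have hMlen : ((matrix.take n').map (fun r => r.take m')).length = n' := by
    simp [List.length_take]; omega
  have hRlen : (pvMkRows ((matrix.take n').map (fun r => r.take m'))).length = n' := by
    rw [length_pvMkRows, hMlen]
  have hRrows : ∀ row ∈ pvMkRows ((matrix.take n').map (fun r => r.take m')), row.length = m' := by
    refine row_len_pvMkRows _ _ ?_
    intro row hrow
    obtain ⟨r, hrmem, rfl⟩ := List.mem_map.mp hrow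
    simp [List.length_take]
    exact hr r hrmem
  rw [pvA_unfold]
  simp only [Int.toNat_natCast,
    show ((n' : Int) - 2) = (((n'-1 : Nat)) : Int) - 1 by push_cast [hn0]; omega,
    show ((m' : Int) - 2) = (((m'-1 : Nat)) : Int) - 1 by push_cast [hm0]; omega,
    show ((n' : Int) - 1) = (((n'-1 : Nat)) : Int) by push_cast [hn0]; omega,
    show ((m' : Int) - 1) = (((m'-1 : Nat)) : Int) by push_cast [hm0]; omega]
  have hph1 : pvSet2 ((List.range n').map (fun _ => List.replicate m' (0:Int)))
      ((n'-1 : Nat) : Int) ((m'-1 : Nat) : Int)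
      (pvGet2 matrix ((n'-1 : Nat) : Int) ((m'-1 : Nat) : Int))
      = pvU n' m' (pvMkRows ((matrix.take n').map (fun r => r.take m'))) (n'-1) := by
    unfold pvSet2 pvGet2
    rw [PySem.List.pySetD_natCast, PySem.List.pyGetD_natCast, PySem.List.pyGetD_natCast,
      PySem.List.pySetD_natCast, PySem.List.pyGetD_natCast]
    rw [pvGetD_map_range _ _ _ (by omega : n'-1 < n')]
    have hlast := pvR_lastX matrix n' m' hm0 hn hr _ rfl (n'-1) (by omega)
    rw [if_neg (by omega)] at hlast
    have hv : ((pvMkRows ((matrix.take n').map (fun r => r.take m'))).getD (n'-1) []).getD (m'-1) 0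
        = (matrix.getD (n'-1) []).getD (m'-1) 0 := by
      have h1 := congrArg List.head? hlast
      rw [List.head?_drop] at h1
      rw [List.getD_eq_getElem?_getD, h1]
      simp
    apply List.ext_getElem (by simp [pvU])
    intro idx h1 h2
    simp only [pvU, List.getElem_map, List.getElem_range, List.getElem_set,
      List.length_map, List.length_range] at h1 h2 ⊢
    by_cases hik : n'-1 = idx
    · subst hik
      rw [if_pos rfl, if_pos (le_refl _), pvColRow, hv]
    · rw [if_neg hik, if_neg (by omega)]
  rw [hph1, pvPhase2_loopX matrix n' m' hm0 hn0 hn hr _ rfl (n'-1) le_rfl]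
  rw [pvTable3X matrix n' _ _ (by rw [pvUlen]; omega)]
  have hrow0 : (pvU n' m' (pvMkRows ((matrix.take n').map (fun r => r.take m'))) 0).getD (n'-1) []
      = pvColRow m' (pvMkRows ((matrix.take n').map (fun r => r.take m'))) (n'-1) := by
    rw [pvUget _ _ _ _ _ (by omega), if_pos (by omega)]
  have hrmat : m' ≤ (PySem.List.pyGetD matrix ((n'-1 : Nat) : Int) []).length := by
    rw [PySem.List.pyGetD_natCast]
    refine hr _ ?_
    have hkmat : n'-1 < matrix.length := by omega
    have h2 : n'-1 < (matrix.take n').length := by simp [List.length_take]; omega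
    rw [List.getD_eq_getElem?_getD, List.getElem?_eq_getElem hkmat]
    rw [show matrix[n'-1]'hkmat = (matrix.take n')[n'-1]'h2 from (List.getElem_take).symm]
    exact List.getElem_mem h2
  have hRn1 : pvMkRowNone ((PySem.List.pyGetD matrix ((n'-1 : Nat) : Int) []).take m')
      = (pvMkRows ((matrix.take n').map (fun r => r.take m'))).getD (n'-1) [] := by
    have hrowk := pvRows_getD ((matrix.take n').map (fun r => r.take m')) (n'-1) (by omega)
    rw [pvMget matrix n' m' (n'-1) (by omega) hn] at hrowk
    have hhead : ((pvMkRows ((matrix.take n').map (fun r => r.take m'))).drop (n'-1+1)).head?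
        = none := by
      rw [List.drop_eq_nil_of_le (by rw [hRlen]; omega)]
      rfl
    rw [hrowk, hhead, PySem.List.pyGetD_natCast]
    rfl
  have hinit : pvColRow m' (pvMkRows ((matrix.take n').map (fun r => r.take m'))) (n'-1)
      = List.replicate (m'-1) 0
        ++ (pvMkRowNone ((PySem.List.pyGetD matrix ((n'-1 : Nat) : Int) []).take m')).drop (m'-1) := by
    rw [hRn1, pvColRow, pvReplicateSet m' hm0]
    congr 1
    have hklen : ((pvMkRows ((matrix.take n').map (fun r => r.take m'))).getD (n'-1) []).length = m' := by
      refine hRrows _ ?_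
      rw [List.getD_eq_getElem?_getD,
        List.getElem?_eq_getElem (by rw [hRlen]; omega : n'-1 < (pvMkRows ((matrix.take n').map (fun r => r.take m'))).length)]
      exact List.getElem_mem _
    rw [pvLastSingleton _ _ hklen hm0]
  rw [hrow0, pvInnA_noneX _ m' hm0 hrmat (m'-1) le_rfl _ hinit, hRn1]
  have hsetS : (pvU n' m' (pvMkRows ((matrix.take n').map (fun r => r.take m'))) 0).set (n'-1)
      ((pvMkRows ((matrix.take n').map (fun r => r.take m'))).getD (n'-1) [])
      = pvS n' m' (pvMkRows ((matrix.take n').map (fun r => r.take m'))) (n'-1) := by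
    apply List.ext_getElem (by simp [pvU, pvS])
    intro idx h1 h2
    simp only [pvU, pvS, List.getElem_map, List.getElem_range, List.getElem_set,
      List.length_map, List.length_range] at h1 h2 ⊢
    by_cases hik : n'-1 = idx
    · subst hik
      rw [if_pos rfl, if_neg (by omega)]
    · rw [if_neg hik, if_pos (by omega), if_pos (by omega)]
  rw [hsetS, pvPhase4_loopX matrix n' m' hm0 hn0 hn hr _ rfl (n'-1) le_rfl]
  have hS0 : pvS n' m' (pvMkRows ((matrix.take n').map (fun r => r.take m'))) 0
      = pvMkRows ((matrix.take n').map (fun r => r.take m')) := by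
    apply List.ext_getElem (by simp only [pvS, List.length_map, List.length_range, hRlen])
    intro idx h1 h2
    simp only [pvS, List.getElem_map, List.getElem_range, List.length_map,
      List.length_range] at h1 ⊢
    rw [if_neg (by omega), List.getD_eq_getElem?_getD, List.getElem?_eq_getElem h2]
    rfl
  rw [hS0]

-- ======== B-side: the stack machine computes the same table ========

-- the table value B is proved to memoize at cell (i, j)
def pvTv (matrix : List (List Int)) (n' m' : Nat) (i j : Nat) : Int :=
  ((pvMkRows ((matrix.take n').map (fun r => r.take m'))).getD i []).getD j 0

def pvCells (n' m' : Nat) : List (Nat × Nat) := List.range n' ×ˢ List.range m'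

-- number of in-bounds cells not yet memoized (the machine's progress measure)
def pvUn (n' m' : Nat) (memo : PySem.Dict (Nat × Nat) Int) : Nat :=
  (pvCells n' m').countP (fun c => (memo.get? c).isNone)

def pvRank (n' m' i j : Nat) : Nat := (n' - i) + (m' - j)

-- every memoized entry is an in-bounds cell holding its table value
def pvGoodM (matrix : List (List Int)) (n' m' : Nat) (memo : PySem.Dict (Nat × Nat) Int) : Prop :=
  ∀ i j v, memo.get? (i, j) = some v → i < n' ∧ j < m' ∧ v = pvTv matrix n' m' i j

-- every memoized cell has its in-bounds neighbours memoized
def pvClosedM (n' m' : Nat) (memo : PySem.Dict (Nat × Nat) Int) : Prop :=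
  ∀ i j v, memo.get? (i, j) = some v →
    (i + 1 < n' → ((memo.get? (i+1, j)).isSome = true)) ∧
    (j + 1 < m' → ((memo.get? (i, j+1)).isSome = true))

theorem pvRun_nil (matrix : List (List Int)) (n m : Int) (fuel : Nat)
    (memo : PySem.Dict (Nat × Nat) Int) : pvRun matrix n m fuel memo [] = memo := by
  cases fuel <;> rfl

theorem pvRun_step_hit (matrix : List (List Int)) (n m : Int)
    (memo : PySem.Dict (Nat × Nat) Int) (i j : Nat)
    (hs : (memo.get? (i, j)).isSome = true) (fuel : Nat) (rest : List (Nat × Nat)) :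
    pvRun matrix n m (fuel + 1) memo ((i, j) :: rest) = pvRun matrix n m fuel memo rest := by
  simp [pvRun, hs]

theorem pvRun_step_expand (matrix : List (List Int)) (n m : Int)
    (memo : PySem.Dict (Nat × Nat) Int) (i j : Nat)
    (hs : (memo.get? (i, j)).isSome = false) (hp : pvPending n m memo i j ≠ [])
    (fuel : Nat) (rest : List (Nat × Nat)) :
    pvRun matrix n m (fuel + 1) memo ((i, j) :: rest)
      = pvRun matrix n m fuel memo ((pvPending n m memo i j).reverse ++ (i, j) :: rest) := by
  simp [pvRun, hs, hp]

theorem pvRun_step_fin (matrix : List (List Int)) (n m : Int)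
    (memo : PySem.Dict (Nat × Nat) Int) (i j : Nat)
    (hs : (memo.get? (i, j)).isSome = false) (hp : pvPending n m memo i j = [])
    (fuel : Nat) (rest : List (Nat × Nat)) :
    pvRun matrix n m (fuel + 1) memo ((i, j) :: rest)
      = pvRun matrix n m fuel (memo.insert (i, j) (pvVal matrix n m memo i j)) rest := by
  simp [pvRun, hs, hp]

-- preservation of lookups under insert
theorem pvSome_insert (memo : PySem.Dict (Nat × Nat) Int) (c k : Nat × Nat) (v : Int)
    (h : (memo.get? k).isSome = true) : ((memo.insert c v).get? k).isSome = true := by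
  rw [PySem.Dict.get?_insert]
  split <;> simp_all

theorem pvUn_insert_lt (n' m' : Nat) (memo : PySem.Dict (Nat × Nat) Int) (i j : Nat) (v : Int)
    (hi : i < n') (hj : j < m') (hnone : memo.get? (i, j) = none) :
    pvUn n' m' (memo.insert (i, j) v) + 1 ≤ pvUn n' m' memo := by
  have hmem : (i, j) ∈ pvCells n' m' := by
    rw [pvCells]
    show (i, j) ∈ (List.range n').product (List.range m')
    exact List.pair_mem_product.mpr ⟨List.mem_range.mpr hi, List.mem_range.mpr hj⟩
  obtain ⟨s, t, hst⟩ := List.append_of_mem hmem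
  have hmono : ∀ l : List (Nat × Nat),
      l.countP (fun c => ((memo.insert (i, j) v).get? c).isNone)
        ≤ l.countP (fun c => (memo.get? c).isNone) := by
    intro l
    refine List.countP_mono_left ?_
    intro c _ hc
    rw [PySem.Dict.get?_insert] at hc
    by_cases hcij : c = (i, j)
    · simp [hcij] at hc
    · rw [if_neg hcij] at hc
      exact hc
  rw [pvUn, pvUn, hst, List.countP_append, List.countP_append, List.countP_cons,
    List.countP_cons]
  have h1 : ((memo.insert (i, j) v).get? (i, j)).isNone = false := by
    rw [PySem.Dict.get?_insert_self]; rfl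
  have h2 : (memo.get? (i, j)).isNone = true := by rw [hnone]; rfl
  have := hmono s
  have := hmono t
  simp only [h1, h2]
  simp only [Bool.false_eq_true, if_false, if_true]
  omega

theorem pvUn_empty (n' m' : Nat) : pvUn n' m' PySem.Dict.empty = n' * m' := by
  rw [pvUn, List.countP_eq_length.mpr (by intro c _; simp [PySem.Dict.get?_empty]),
    pvCells, List.length_product, List.length_range, List.length_range]


-- lengths of the table, packaged for reuse
theorem pvRlenX (matrix : List (List Int)) (n' m' : Nat) (hn : n' ≤ matrix.length) :
    (pvMkRows ((matrix.take n').map (fun r => r.take m'))).length = n' := by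
  rw [length_pvMkRows]
  simp [List.length_take]; omega

theorem pvRrowsX (matrix : List (List Int)) (n' m' : Nat)
    (hr : ∀ r ∈ matrix.take n', m' ≤ r.length) :
    ∀ row ∈ pvMkRows ((matrix.take n').map (fun r => r.take m')), row.length = m' := by
  refine row_len_pvMkRows _ _ ?_
  intro row hrow
  obtain ⟨r, hrmem, rfl⟩ := List.mem_map.mp hrow
  simp [List.length_take]
  exact hr r hrmem

theorem pvRrowLen (matrix : List (List Int)) (n' m' : Nat) (hn : n' ≤ matrix.length)
    (hr : ∀ r ∈ matrix.take n', m' ≤ r.length) (i : Nat) (hi : i < n') :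
    ((pvMkRows ((matrix.take n').map (fun r => r.take m'))).getD i []).length = m' := by
  refine pvRrowsX matrix n' m' hr _ ?_
  rw [List.getD_eq_getElem?_getD,
    List.getElem?_eq_getElem (by rw [pvRlenX matrix n' m' hn]; omega)]
  exact List.getElem_mem _

-- one row of the table, characterized by the row below
theorem pvRowChar (matrix : List (List Int)) (n' m' : Nat) (hn : n' ≤ matrix.length)
    (i : Nat) (hi : i < n') :
    (pvMkRows ((matrix.take n').map (fun r => r.take m'))).getD i []
      = (if i + 1 < n' then
          pvMkRowSome ((matrix.getD i []).take m')
            ((pvMkRows ((matrix.take n').map (fun r => r.take m'))).getD (i+1) [])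
         else pvMkRowNone ((matrix.getD i []).take m')) := by
  have hMlen : ((matrix.take n').map (fun r => r.take m')).length = n' := by
    simp [List.length_take]; omega
  have hRlen := pvRlenX matrix n' m' hn
  have hrow := pvRows_getD ((matrix.take n').map (fun r => r.take m')) i (by omega)
  rw [pvMget matrix n' m' i hi hn] at hrow
  by_cases hlt : i + 1 < n'
  · have hhead : ((pvMkRows ((matrix.take n').map (fun r => r.take m'))).drop (i+1)).head?
        = some ((pvMkRows ((matrix.take n').map (fun r => r.take m'))).getD (i+1) []) := by
      rw [List.head?_drop, List.getD_eq_getElem?_getD,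
        List.getElem?_eq_getElem (by rw [hRlen]; omega)]
      rfl
    rw [hrow, hhead, if_pos hlt]
    rfl
  · have hhead : ((pvMkRows ((matrix.take n').map (fun r => r.take m'))).drop (i+1)).head?
        = none := by
      rw [List.drop_eq_nil_of_le (by rw [hRlen]; omega)]
      rfl
    rw [hrow, hhead, if_neg hlt]
    rfl

theorem getD_pvMkRowNone (s : List Int) : ∀ j, j < s.length →
    (pvMkRowNone s).getD j 0
      = s.getD j 0 + (if j + 1 < s.length then (pvMkRowNone s).getD (j+1) 0 else 0) := by
  induction s with
  | nil => intro j hj; simp at hj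
  | cons x rest ih =>
    intro j hj
    obtain ⟨h, hh⟩ := pvMkRowNone_cons_ex x rest
    cases j with
    | zero =>
      rcases hE : pvMkRowNone rest with _ | ⟨y, ys⟩
      · have hlen := length_pvMkRowNone rest
        rw [hE] at hlen
        have hr : rest = [] := by
          cases rest
          · rfl
          · simp at hlen
        subst hr
        simp [pvMkRowNone]
      · have hlen := length_pvMkRowNone rest
        rw [hE] at hlen
        simp at hlen
        simp only [pvMkRowNone, hE]
        rw [if_pos (by simp; omega)]
        simp
    | succ j =>
      rw [hh]
      simp only [List.getD_cons_succ, List.length_cons]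
      rw [ih j (by simpa using hj)]
      congr 1
      rw [if_congr (by omega : (j + 1 < rest.length) ↔ (j + 1 + 1 < rest.length + 1)) rfl rfl]

theorem getD_pvMkRowSome (r : List Int) : ∀ (b : List Int), r.length = b.length →
    ∀ j, j < r.length →
    (pvMkRowSome r b).getD j 0
      = r.getD j 0 + (if j + 1 < r.length
          then max (b.getD j 0) ((pvMkRowSome r b).getD (j+1) 0)
          else b.getD j 0) := by
  induction r with
  | nil => intro b _ j hj; simp at hj
  | cons x rest ih =>
    intro b hb j hj
    cases b with
    | nil => simp at hb
    | cons z brest =>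
      obtain ⟨h, hh⟩ := pvMkRowSome_cons_ex x z rest brest
      cases j with
      | zero =>
        rcases hE : pvMkRowSome rest brest with _ | ⟨y, ys⟩
        · have hlen := length_pvMkRowSome rest brest (by simpa using hb)
          rw [hE] at hlen
          have hr : rest = [] := by
            cases rest
            · rfl
            · simp at hlen
          subst hr
          simp [pvMkRowSome]
        · have hlen := length_pvMkRowSome rest brest (by simpa using hb)
          rw [hE] at hlen
          simp at hlen
          simp only [pvMkRowSome, hE]
          rw [if_pos (by simp; omega)]
          simp
      | succ j =>
        rw [hh]
        simp only [List.getD_cons_succ, List.length_cons]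
        rw [ih brest (by simpa using hb) j (by simpa using hj)]
        congr 1
        rw [if_congr (by omega : (j + 1 < rest.length) ↔ (j + 1 + 1 < rest.length + 1)) rfl rfl]

-- the table recurrence at an in-bounds cell
theorem pvTrec (matrix : List (List Int)) (n' m' : Nat)
    (hn : n' ≤ matrix.length) (hr : ∀ r ∈ matrix.take n', m' ≤ r.length)
    (i j : Nat) (hi : i < n') (hj : j < m') :
    pvTv matrix n' m' i j = (matrix.getD i []).getD j 0 +
      (if i + 1 < n' ∧ j + 1 < m' then max (pvTv matrix n' m' (i+1) j) (pvTv matrix n' m' i (j+1))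
       else if i + 1 < n' then pvTv matrix n' m' (i+1) j
       else if j + 1 < m' then pvTv matrix n' m' i (j+1)
       else 0) := by
  have hmemT : matrix.getD i [] ∈ matrix.take n' := by
    have hmat : i < matrix.length := by omega
    have h2 : i < (matrix.take n').length := by simp [List.length_take]; omega
    rw [List.getD_eq_getElem?_getD, List.getElem?_eq_getElem hmat]
    rw [show matrix[i]'hmat = (matrix.take n')[i]'h2 from (List.getElem_take).symm]
    exact List.getElem_mem h2
  have hrlen : m' ≤ (matrix.getD i []).length := hr _ hmemT
  have htlen : ((matrix.getD i []).take m').length = m' := by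
    rw [List.length_take]; omega
  have htget : ((matrix.getD i []).take m').getD j 0 = (matrix.getD i []).getD j 0 := by
    simp [List.getD_eq_getElem?_getD, List.getElem?_take_of_lt hj]
  by_cases hlt : i + 1 < n'
  · have hblen : ((pvMkRows ((matrix.take n').map (fun r => r.take m'))).getD (i+1) []).length = m' :=
      pvRrowLen matrix n' m' hn hr (i+1) hlt
    have hchar := pvRowChar matrix n' m' hn i hi
    rw [if_pos hlt] at hchar
    rw [pvTv, hchar, getD_pvMkRowSome _ _ (by rw [htlen, hblen]) j (by omega), htget]
    congr 1
    rw [if_congr (by omega : (j + 1 < ((matrix.getD i []).take m').length) ↔ (j + 1 < m')) rfl rfl]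
    by_cases hjlt : j + 1 < m'
    · rw [if_pos hjlt, if_pos ⟨hlt, hjlt⟩]
      congr 1
      rw [pvTv, hchar]
    · rw [if_neg hjlt, if_neg (fun h => hjlt h.2), if_pos hlt, pvTv]
  · have hchar := pvRowChar matrix n' m' hn i hi
    rw [if_neg hlt] at hchar
    rw [pvTv, hchar, getD_pvMkRowNone _ j (by omega), htget]
    congr 1
    rw [if_congr (by omega : (j + 1 < ((matrix.getD i []).take m').length) ↔ (j + 1 < m')) rfl rfl]
    by_cases hjlt : j + 1 < m'
    · rw [if_pos hjlt, if_neg (fun h => hlt h.1), if_neg hlt, if_pos hjlt, pvTv, hchar]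
    · rw [if_neg hjlt, if_neg (fun h => hlt h.1), if_neg hlt, if_neg hjlt]

-- the final step of the machine at a cell whose neighbours are memoized
theorem pvFinStep (matrix : List (List Int)) (n m : Int) (n' m' : Nat)
    (hn' : n = (n' : Int)) (hm' : m = (m' : Int))
    (hn : n' ≤ matrix.length) (hr : ∀ r ∈ matrix.take n', m' ≤ r.length)
    (memo : PySem.Dict (Nat × Nat) Int)
    (hG : pvGoodM matrix n' m' memo) (hC : pvClosedM n' m' memo)
    (i j : Nat) (hi : i < n') (hj : j < m')
    (hd1 : i + 1 < n' → (memo.get? (i+1, j)).isSome = true)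
    (hd2 : j + 1 < m' → (memo.get? (i, j+1)).isSome = true)
    (hmiss : memo.get? (i, j) = none) :
    pvPending n m memo i j = [] ∧
    pvVal matrix n m memo i j = pvTv matrix n' m' i j ∧
    pvGoodM matrix n' m' (memo.insert (i, j) (pvVal matrix n m memo i j)) ∧
    pvClosedM n' m' (memo.insert (i, j) (pvVal matrix n m memo i j)) ∧
    pvUn n' m' (memo.insert (i, j) (pvVal matrix n m memo i j)) + 1 ≤ pvUn n' m' memo := by
  subst hn' hm'
  have hcn : ((i : Int) + 1 < (n' : Int)) ↔ i + 1 < n' := by omega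
  have hcm : ((j : Int) + 1 < (m' : Int)) ↔ j + 1 < m' := by omega
  have hpend : pvPending (n' : Int) (m' : Int) memo i j = [] := by
    rw [pvPending, if_neg, if_neg]
    · rfl
    · rintro ⟨hlt, hnone⟩
      have := hd2 (hcm.mp hlt)
      rw [hnone] at this
      simp at this
    · rintro ⟨hlt, hnone⟩
      have := hd1 (hcn.mp hlt)
      rw [hnone] at this
      simp at this
  have hval : pvVal matrix (n' : Int) (m' : Int) memo i j = pvTv matrix n' m' i j := by
    rw [pvVal]
    have hg2 : pvGet2 matrix (i : Int) (j : Int) = (matrix.getD i []).getD j 0 := by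
      rw [pvGet2, PySem.List.pyGetD_natCast, PySem.List.pyGetD_natCast]
    rw [hg2, pvTrec matrix n' m' hn hr i j hi hj]
    simp only [hcn, hcm]
    congr 1
    by_cases h1 : i + 1 < n' <;> by_cases h2 : j + 1 < m'
    · obtain ⟨v1, hv1⟩ := Option.isSome_iff_exists.mp (hd1 h1)
      obtain ⟨v2, hv2⟩ := Option.isSome_iff_exists.mp (hd2 h2)
      rw [if_pos ⟨h1, h2⟩, if_pos ⟨h1, h2⟩, PySem.Dict.getD_eq_get?_getD,
        PySem.Dict.getD_eq_get?_getD, hv1, hv2, (hG _ _ _ hv1).2.2, (hG _ _ _ hv2).2.2]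
      rfl
    · obtain ⟨v1, hv1⟩ := Option.isSome_iff_exists.mp (hd1 h1)
      rw [if_neg (fun h => h2 h.2), if_pos h1, if_neg (fun h => h2 h.2), if_pos h1,
        PySem.Dict.getD_eq_get?_getD, hv1, (hG _ _ _ hv1).2.2]
      rfl
    · obtain ⟨v2, hv2⟩ := Option.isSome_iff_exists.mp (hd2 h2)
      rw [if_neg (fun h => h1 h.1), if_neg h1, if_pos h2, if_neg (fun h => h1 h.1),
        if_neg h1, if_pos h2, PySem.Dict.getD_eq_get?_getD, hv2, (hG _ _ _ hv2).2.2]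
      rfl
    · rw [if_neg (fun h => h1 h.1), if_neg h1, if_neg h2, if_neg (fun h => h1 h.1),
        if_neg h1, if_neg h2]
  refine ⟨hpend, hval, ?_, ?_, ?_⟩
  · intro i' j' v hv
    rw [PySem.Dict.get?_insert] at hv
    by_cases hk : ((i', j') : Nat × Nat) = (i, j)
    · rw [if_pos hk] at hv
      have h1 : i' = i := by rw [Prod.mk.injEq] at hk; exact hk.1
      have h2 : j' = j := by rw [Prod.mk.injEq] at hk; exact hk.2
      subst h1; subst h2
      refine ⟨hi, hj, ?_⟩
      rw [← Option.some_inj.mp hv, hval]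
    · rw [if_neg hk] at hv
      exact hG _ _ _ hv
  · intro i' j' v hv
    rw [PySem.Dict.get?_insert] at hv
    by_cases hk : ((i', j') : Nat × Nat) = (i, j)
    · have h1 : i' = i := by rw [Prod.mk.injEq] at hk; exact hk.1
      have h2 : j' = j := by rw [Prod.mk.injEq] at hk; exact hk.2
      subst h1; subst h2
      exact ⟨fun h => pvSome_insert _ _ _ _ (hd1 h), fun h => pvSome_insert _ _ _ _ (hd2 h)⟩
    · rw [if_neg hk] at hv
      exact ⟨fun h => pvSome_insert _ _ _ _ ((hC _ _ _ hv).1 h),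
        fun h => pvSome_insert _ _ _ _ ((hC _ _ _ hv).2 h)⟩
  · exact pvUn_insert_lt n' m' memo i j _ hi hj hmiss

-- the machine evaluates one cell: correctness, progress and fuel accounting
theorem pvEval (matrix : List (List Int)) (n m : Int) (n' m' : Nat)
    (hn' : n = (n' : Int)) (hm' : m = (m' : Int))
    (hn : n' ≤ matrix.length) (hr : ∀ r ∈ matrix.take n', m' ≤ r.length) :
    ∀ (B : Nat) (memo : PySem.Dict (Nat × Nat) Int) (i j : Nat),
      3 * pvUn n' m' memo + pvRank n' m' i j < B →
      pvGoodM matrix n' m' memo → pvClosedM n' m' memo → i < n' → j < m' →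
      ∃ (used : Nat) (memo' : PySem.Dict (Nat × Nat) Int),
        (∀ rest fuel, pvRun matrix n m (used + fuel) memo ((i, j) :: rest)
            = pvRun matrix n m fuel memo' rest) ∧
        pvGoodM matrix n' m' memo' ∧ pvClosedM n' m' memo' ∧
        (∀ k v, memo.get? k = some v → memo'.get? k = some v) ∧
        (memo'.get? (i, j)).isSome = true ∧
        (∀ k v, memo'.get? k = some v →
          (memo.get? k).isSome = true ∨ pvRank n' m' k.1 k.2 ≤ pvRank n' m' i j) ∧
        1 ≤ used ∧
        used + 3 * pvUn n' m' memo' ≤ 1 + 3 * pvUn n' m' memo ∧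
        ((memo.get? (i, j)).isSome = false →
          used + 3 * pvUn n' m' memo' + 2 ≤ 3 * pvUn n' m' memo) := by
  subst hn' hm'
  intro B
  induction B with
  | zero => intro memo i j hB; omega
  | succ B ih =>
    intro memo i j hB hG hC hi hj
    by_cases hhit : (memo.get? (i, j)).isSome = true
    · refine ⟨1, memo, ?_, hG, hC, fun k v h => h, hhit,
        fun k v h => Or.inl (by rw [h]; rfl), le_refl 1, by omega, ?_⟩
      · intro rest fuel
        rw [show 1 + fuel = fuel + 1 by omega, pvRun_step_hit _ _ _ memo i j hhit]
      · intro hf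
        rw [hhit] at hf
        cases hf
    · have hmiss : memo.get? (i, j) = none := by
        rcases hE : memo.get? (i, j) with _ | v
        · rfl
        · rw [hE] at hhit; simp at hhit
      have hhitF : (memo.get? (i, j)).isSome = false := by rw [hmiss]; rfl
      by_cases hc1 : ((i : Int) + 1 < (n' : Int) ∧ memo.get? (i+1, j) = none)
      · by_cases hc2 : ((j : Int) + 1 < (m' : Int) ∧ memo.get? (i, j+1) = none)
        · have hi2 : i + 1 < n' := by have := hc1.1; omega
          have hj2 : j + 1 < m' := by have := hc2.1; omega
          obtain ⟨u2, memo2, hrun2, hG2, hC2, hext2, hsome2, hlow2, hge2, hw2, hs2⟩ :=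
            ih memo i (j+1) (by simp only [pvRank] at hB ⊢; omega) hG hC hi hj2
          have hs2' := hs2 (by rw [hc2.2]; rfl)
          obtain ⟨u1, memo3, hrun1, hG3, hC3, hext1, hsome1, hlow1, hge1, hw1, hs1⟩ :=
            ih memo2 (i+1) j (by simp only [pvRank] at hB ⊢; omega) hG2 hC2 hi2 hj
          have hm3 : memo3.get? (i, j) = none := by
            rcases hE : memo3.get? (i, j) with _ | v
            · rfl
            · exfalso
              rcases hlow1 _ _ hE with hA | hA
              · obtain ⟨w, hw⟩ := Option.isSome_iff_exists.mp hA
                rcases hlow2 _ _ hw with hB' | hB'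
                · rw [hmiss] at hB'; cases hB'
                · simp only [pvRank] at hB'; omega
              · simp only [pvRank] at hA; omega
          have hd1' : i + 1 < n' → (memo3.get? (i+1, j)).isSome = true := fun _ => hsome1
          have hd2' : j + 1 < m' → (memo3.get? (i, j+1)).isSome = true := by
            intro _
            obtain ⟨w, hw⟩ := Option.isSome_iff_exists.mp hsome2
            rw [hext1 _ _ hw]
            rfl
          obtain ⟨hp3, hval, hGood, hClosed, hUi⟩ :=
            pvFinStep matrix _ _ n' m' rfl rfl hn hr memo3 hG3 hC3 i j hi hj hd1' hd2' hm3
          have hpend : pvPending (n' : Int) (m' : Int) memo i j = [(i+1, j), (i, j+1)] := by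
            rw [pvPending, if_pos hc1, if_pos hc2]
            rfl
          refine ⟨u2 + u1 + 2, memo3.insert (i, j) (pvVal matrix _ _ memo3 i j), ?_, hGood,
            hClosed, ?_, ?_, ?_, by omega, by omega, fun _ => by omega⟩
          · intro rest fuel
            rw [show u2 + u1 + 2 + fuel = (u2 + (u1 + (1 + fuel))) + 1 by omega,
              pvRun_step_expand _ _ _ memo i j hhitF (by rw [hpend]; simp), hpend]
            have h2 := hrun2 ((i+1, j) :: (i, j) :: rest) (u1 + (1 + fuel))
            have h1 := hrun1 ((i, j) :: rest) (1 + fuel)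
            simp only [List.reverse_cons, List.reverse_nil, List.nil_append, List.cons_append,
              List.nil_append] at *
            rw [h2, h1, show 1 + fuel = fuel + 1 by omega,
              pvRun_step_fin _ _ _ memo3 i j (by rw [hm3]; rfl) hp3]
          · intro k v h
            have h2 := hext1 _ _ (hext2 _ _ h)
            rw [PySem.Dict.get?_insert,
              if_neg (fun he => by rw [he, hm3] at h2; cases h2)]
            exact h2
          · rw [PySem.Dict.get?_insert_self]; rfl
          · intro k v h
            rw [PySem.Dict.get?_insert] at h
            by_cases hk : k = (i, j)
            · right
              rw [hk]
            · rw [if_neg hk] at h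
              rcases hlow1 _ _ h with hA | hA
              · obtain ⟨w, hw⟩ := Option.isSome_iff_exists.mp hA
                rcases hlow2 _ _ hw with hB' | hB'
                · exact Or.inl hB'
                · right
                  simp only [pvRank] at hB' ⊢
                  omega
              · right
                simp only [pvRank] at hA ⊢
                omega
        · have hi2 : i + 1 < n' := by have := hc1.1; omega
          obtain ⟨u1, memo1, hrun1, hG1, hC1, hext1, hsome1, hlow1, hge1, hw1, hs1⟩ :=
            ih memo (i+1) j (by simp only [pvRank] at hB ⊢; omega) hG hC hi2 hj
          have hs1' := hs1 (by rw [hc1.2]; rfl)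
          have hm1 : memo1.get? (i, j) = none := by
            rcases hE : memo1.get? (i, j) with _ | v
            · rfl
            · exfalso
              rcases hlow1 _ _ hE with hA | hA
              · rw [hmiss] at hA; cases hA
              · simp only [pvRank] at hA; omega
          have hd1' : i + 1 < n' → (memo1.get? (i+1, j)).isSome = true := fun _ => hsome1
          have hd2' : j + 1 < m' → (memo1.get? (i, j+1)).isSome = true := by
            intro h
            rcases hE : memo.get? (i, j+1) with _ | v
            · exact absurd ⟨by omega, hE⟩ hc2
            · rw [hext1 _ _ hE]; rfl
          obtain ⟨hp1, hval, hGood, hClosed, hUi⟩ :=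
            pvFinStep matrix _ _ n' m' rfl rfl hn hr memo1 hG1 hC1 i j hi hj hd1' hd2' hm1
          have hpend : pvPending (n' : Int) (m' : Int) memo i j = [(i+1, j)] := by
            rw [pvPending, if_pos hc1, if_neg hc2]
            rfl
          refine ⟨u1 + 2, memo1.insert (i, j) (pvVal matrix _ _ memo1 i j), ?_, hGood, hClosed,
            ?_, ?_, ?_, by omega, by omega, fun _ => by omega⟩
          · intro rest fuel
            rw [show u1 + 2 + fuel = (u1 + (1 + fuel)) + 1 by omega,
              pvRun_step_expand _ _ _ memo i j hhitF (by rw [hpend]; simp), hpend]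
            have h1 := hrun1 ((i, j) :: rest) (1 + fuel)
            simp only [List.reverse_cons, List.reverse_nil, List.nil_append, List.cons_append,
              List.nil_append] at *
            rw [h1, show 1 + fuel = fuel + 1 by omega,
              pvRun_step_fin _ _ _ memo1 i j (by rw [hm1]; rfl) hp1]
          · intro k v h
            have h2 := hext1 _ _ h
            rw [PySem.Dict.get?_insert,
              if_neg (fun he => by rw [he, hm1] at h2; cases h2)]
            exact h2
          · rw [PySem.Dict.get?_insert_self]; rfl
          · intro k v h
            rw [PySem.Dict.get?_insert] at h
            by_cases hk : k = (i, j)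
            · right
              rw [hk]
            · rw [if_neg hk] at h
              rcases hlow1 _ _ h with hA | hA
              · exact Or.inl hA
              · right
                simp only [pvRank] at hA ⊢
                omega
        -- both neighbours pending: the right one is on top, then the down one
      · by_cases hc2 : ((j : Int) + 1 < (m' : Int) ∧ memo.get? (i, j+1) = none)
        · have hj2 : j + 1 < m' := by have := hc2.1; omega
          obtain ⟨u2, memo2, hrun2, hG2, hC2, hext2, hsome2, hlow2, hge2, hw2, hs2⟩ :=
            ih memo i (j+1) (by simp only [pvRank] at hB ⊢; omega) hG hC hi hj2
          have hs2' := hs2 (by rw [hc2.2]; rfl)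
          have hm2 : memo2.get? (i, j) = none := by
            rcases hE : memo2.get? (i, j) with _ | v
            · rfl
            · exfalso
              rcases hlow2 _ _ hE with hA | hA
              · rw [hmiss] at hA; cases hA
              · simp only [pvRank] at hA; omega
          have hd1' : i + 1 < n' → (memo2.get? (i+1, j)).isSome = true := by
            intro h
            rcases hE : memo.get? (i+1, j) with _ | v
            · exact absurd ⟨by omega, hE⟩ hc1
            · rw [hext2 _ _ hE]; rfl
          have hd2' : j + 1 < m' → (memo2.get? (i, j+1)).isSome = true := fun _ => hsome2
          obtain ⟨hp2, hval, hGood, hClosed, hUi⟩ :=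
            pvFinStep matrix _ _ n' m' rfl rfl hn hr memo2 hG2 hC2 i j hi hj hd1' hd2' hm2
          have hpend : pvPending (n' : Int) (m' : Int) memo i j = [(i, j+1)] := by
            rw [pvPending, if_neg hc1, if_pos hc2]
            rfl
          refine ⟨u2 + 2, memo2.insert (i, j) (pvVal matrix _ _ memo2 i j), ?_, hGood, hClosed,
            ?_, ?_, ?_, by omega, by omega, fun _ => by omega⟩
          · intro rest fuel
            rw [show u2 + 2 + fuel = (u2 + (1 + fuel)) + 1 by omega,
              pvRun_step_expand _ _ _ memo i j hhitF (by rw [hpend]; simp), hpend]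
            have h1 := hrun2 ((i, j) :: rest) (1 + fuel)
            simp only [List.reverse_cons, List.reverse_nil, List.nil_append, List.cons_append,
              List.nil_append] at *
            rw [h1, show 1 + fuel = fuel + 1 by omega,
              pvRun_step_fin _ _ _ memo2 i j (by rw [hm2]; rfl) hp2]
          · intro k v h
            have h2 := hext2 _ _ h
            rw [PySem.Dict.get?_insert,
              if_neg (fun he => by rw [he, hm2] at h2; cases h2)]
            exact h2
          · rw [PySem.Dict.get?_insert_self]; rfl
          · intro k v h
            rw [PySem.Dict.get?_insert] at h
            by_cases hk : k = (i, j)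
            · right
              rw [hk]
            · rw [if_neg hk] at h
              rcases hlow2 _ _ h with hA | hA
              · exact Or.inl hA
              · right
                simp only [pvRank] at hA ⊢
                omega
        -- only the down neighbour is pending
        · have hd1 : i + 1 < n' → (memo.get? (i+1, j)).isSome = true := by
            intro h
            rcases hE : memo.get? (i+1, j) with _ | v
            · exact absurd ⟨by omega, hE⟩ hc1
            · rfl
          have hd2 : j + 1 < m' → (memo.get? (i, j+1)).isSome = true := by
            intro h
            rcases hE : memo.get? (i, j+1) with _ | v
            · exact absurd ⟨by omega, hE⟩ hc2
            · rfl
          obtain ⟨hp, hval, hGood, hClosed, hUi⟩ :=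
            pvFinStep matrix _ _ n' m' rfl rfl hn hr memo hG hC i j hi hj hd1 hd2 hmiss
          refine ⟨1, memo.insert (i, j) (pvVal matrix _ _ memo i j), ?_, hGood, hClosed,
            ?_, ?_, ?_, le_refl 1, by omega, fun _ => by omega⟩
          · intro rest fuel
            rw [show 1 + fuel = fuel + 1 by omega, pvRun_step_fin _ _ _ memo i j hhitF hp]
          · intro k v h
            rw [PySem.Dict.get?_insert,
              if_neg (fun he => by rw [he, hmiss] at h; cases h)]
            exact h
          · rw [PySem.Dict.get?_insert_self]; rfl
          · intro k v h
            rw [PySem.Dict.get?_insert] at h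
            by_cases hk : k = (i, j)
            · right
              rw [hk]
            · rw [if_neg hk] at h
              exact Or.inl (by rw [h]; rfl)
        -- only the right neighbour is pending
-- the machine memoizes every cell (downward closure from the corner)
theorem pvAllCells (n' m' : Nat) (memo : PySem.Dict (Nat × Nat) Int)
    (hC : pvClosedM n' m' memo) (h00 : (memo.get? (0, 0)).isSome = true) :
    ∀ (k i j : Nat), i + j = k → i < n' → j < m' → (memo.get? (i, j)).isSome = true := by
  intro k
  induction k with
  | zero =>
    intro i j hij hi hj
    have : i = 0 ∧ j = 0 := by omega
    rw [this.1, this.2]; exact h00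
  | succ k ih =>
    intro i j hij hi hj
    rcases Nat.eq_zero_or_pos i with h0 | h0
    · have hj0 : 0 < j := by omega
      have hprev := ih i (j-1) (by omega) hi (by omega)
      obtain ⟨v, hv⟩ := Option.isSome_iff_exists.mp hprev
      have := (hC i (j-1) v hv).2 (by omega)
      rwa [show (i, j-1+1) = (i, j) by congr 1; omega] at this
    · have hprev := ih (i-1) j (by omega) (by omega) hj
      obtain ⟨v, hv⟩ := Option.isSome_iff_exists.mp hprev
      have := (hC (i-1) j v hv).1 (by omega)
      rwa [show (i-1+1, j) = (i, j) by congr 1; omega] at this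

-- B computes the same query fold over the same table
theorem pvBsideX (matrix : List (List Int)) (queries : List (Int × Int × Int)) (n' m' : Nat)
    (hn0 : 0 < n') (hm0 : 0 < m') (hn : n' ≤ matrix.length)
    (hr : ∀ r ∈ matrix.take n', m' ≤ r.length) :
    max_weight_sum_alt matrix (n' : Int) (m' : Int) queries
      = queries.foldl (fun results q =>
          if q.1 = 1 then
            results ++ [pvGet2 (pvMkRows ((matrix.take n').map (fun r => r.take m')))
              (q.2.1 - 1) (q.2.2 - 1)]
          else if q.1 = 2 then
            results ++ [pvGet2 (pvMkRows ((matrix.take n').map (fun r => r.take m'))) 0 0]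
          else results) [] := by
  have hRlen := pvRlenX matrix n' m' hn
  have hRrows := pvRrowsX matrix n' m' hr
  obtain ⟨used, memo', hrun, hG', hC', hext, hsome00, hlow, hge, hw, hs⟩ :=
    pvEval matrix ((n' : Nat) : Int) ((m' : Nat) : Int) n' m' rfl rfl hn hr
      (3 * pvUn n' m' (PySem.Dict.empty) + pvRank n' m' 0 0 + 1) PySem.Dict.empty 0 0
      (by omega)
      (fun i j v h => by rw [PySem.Dict.get?_empty] at h; cases h)
      (fun i j v h => by rw [PySem.Dict.get?_empty] at h; cases h)
      hn0 hm0
  have hU0 := pvUn_empty n' m'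
  have hmemoF : pvRun matrix (n' : Int) (m' : Int) (3 * (n' * m') + 1)
      PySem.Dict.empty [(0, 0)] = memo' := by
    have h := hrun [] (3 * (n' * m') + 1 - used)
    rw [show used + (3 * (n' * m') + 1 - used) = 3 * (n' * m') + 1 by omega] at h
    rw [h, pvRun_nil]
  have hdp : (List.range n').map (fun i => (List.range m').map (fun j => memo'.getD (i, j) 0))
      = pvMkRows ((matrix.take n').map (fun r => r.take m')) := by
    apply List.ext_getElem (by rw [hRlen]; simp)
    intro i h1 h2
    simp only [List.getElem_map, List.getElem_range]
    have hi' : i < n' := by simpa using h1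
    have hrlen2 : ((pvMkRows ((matrix.take n').map (fun r => r.take m')))[i]'h2).length = m' :=
      hRrows _ (List.getElem_mem h2)
    apply List.ext_getElem (by simp only [List.length_map, List.length_range, hrlen2])
    intro j hj1 hj2
    simp only [List.getElem_map, List.getElem_range]
    have hj' : j < m' := by simpa using hj1
    obtain ⟨v, hv⟩ := Option.isSome_iff_exists.mp
      (pvAllCells n' m' memo' hC' hsome00 (i+j) i j rfl hi' hj')
    rw [PySem.Dict.getD_eq_get?_getD, hv, Option.getD_some, (hG' i j v hv).2.2, pvTv]
    have hgi : (pvMkRows ((matrix.take n').map (fun r => r.take m'))).getD i []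
        = (pvMkRows ((matrix.take n').map (fun r => r.take m')))[i]'h2 := by
      rw [List.getD_eq_getElem?_getD, List.getElem?_eq_getElem h2]
      rfl
    rw [hgi, List.getD_eq_getElem?_getD,
      List.getElem?_eq_getElem (by rw [hrlen2]; exact hj'), Option.getD_some]
  simp only [max_weight_sum_alt, Int.toNat_natCast]
  rw [hmemoF, hdp]

-- ===== VERDICT (by name: the statement is the Claim_ definition above) =====
theorem max_weight_sum_spec : Claim_equal_max_weight_sum := by
  intro matrix n m queries hdom hpre
  obtain ⟨hn1, hm1, hnlen, hrow, hq⟩ := hpre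
  have hn : n = (n.toNat : Int) := (Int.toNat_of_nonneg (by omega)).symm
  have hm : m = (m.toNat : Int) := (Int.toNat_of_nonneg (by omega)).symm
  unfold Spec_max_weight_sum
  rw [hn, hm] at *
  rw [pvAsideX matrix queries n.toNat m.toNat (by omega) (by omega) (by omega)
        (fun r hr => by have := hrow r hr; omega),
      pvBsideX matrix queries n.toNat m.toNat (by omega) (by omega) (by omega)
        (fun r hr => by have := hrow r hr; omega)]
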